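-- pv_equiv track=rewrite | github.com/ZachOhara/Project-Euler | python/p001_p010/problem008.py | adjProducts
-- ===== SOURCE A (Python) =====
-- def adjProducts(series, adj):
-- 	productList = []
-- 	for i in range(len(series) - adj):
-- 		product = 1
-- 		for j in range(adj):
-- 			product *= series[i+j]
-- 		productList.append(product)
-- 	return productList
-- ===== SOURCE B (Python) =====
-- def adjProducts(series, adj):
--     n = len(series)
--     m = n - adj
--     if m <= 0:
--         return []
--     if adj <= 0:
--         return [1] * m
--     prod = 1
--     zeros = 0
--     for x in series[:adj]:
--         if x == 0:
--             zeros += 1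
--         else:
--             prod *= x
--     out = [0 if zeros else prod]
--     for i in range(1, m):
--         old = series[i - 1]
--         new = series[i + adj - 1]
--         if old == 0:
--             zeros -= 1
--         else:
--             prod //= old
--         if new == 0:
--             zeros += 1
--         else:
--             prod *= new
--         out.append(0 if zeros else prod)
--     return out
-- ===== Notes on version B (the rewrite author's own statement) =====
-- stated objective: faster
-- what changed: Replaces the nested loop (recomputing each window product from scratch) by a single sliding-window pass that maintains the running product of the window's nonzero elements plus a zero counter, updating both incrementally as the window slides.
import Mathlib
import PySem

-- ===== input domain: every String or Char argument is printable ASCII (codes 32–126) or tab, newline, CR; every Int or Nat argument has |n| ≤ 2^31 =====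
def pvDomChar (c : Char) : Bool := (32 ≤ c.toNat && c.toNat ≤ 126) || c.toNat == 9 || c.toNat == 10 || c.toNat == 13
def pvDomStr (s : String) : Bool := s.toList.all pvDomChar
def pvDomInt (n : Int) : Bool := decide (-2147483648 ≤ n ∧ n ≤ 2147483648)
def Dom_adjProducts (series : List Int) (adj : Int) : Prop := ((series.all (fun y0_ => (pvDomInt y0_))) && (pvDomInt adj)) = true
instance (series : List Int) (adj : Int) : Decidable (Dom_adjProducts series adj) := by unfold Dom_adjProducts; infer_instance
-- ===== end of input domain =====

-- B replaces A's nested window recomputation by a single sliding-window pass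
-- (running product of nonzero elements + zero counter); asymptotically faster.


-- ===== PORT A =====
def adjProducts (series : List Int) (adj : Int) : List Int :=
  (PySem.List.pyRange 0 (PySem.List.len series - adj) 1).foldl
    (fun productList i =>
      productList ++
        [(PySem.List.pyRange 0 adj 1).foldl
          (fun product j => product * PySem.List.pyGetD series (i + j) 0) 1])
    []

-- ===== PORT B =====
def adjProducts_alt (series : List Int) (adj : Int) : List Int :=
  let n : Int := PySem.List.len series
  let m : Int := n - adj
  if m ≤ 0 then []
  else if adj ≤ 0 then List.replicate m.toNat 1
  else
    let pz : Int × Int :=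
      (PySem.List.slice series none (some adj)).foldl
        (fun (pz : Int × Int) x => if x = 0 then (pz.1, pz.2 + 1) else (pz.1 * x, pz.2))
        (1, 0)
    let st : Int × Int × List Int :=
      (PySem.List.pyRange 1 m 1).foldl
        (fun (st : Int × Int × List Int) i =>
          let old := PySem.List.pyGetD series (i - 1) 0
          let nw := PySem.List.pyGetD series (i + adj - 1) 0
          let prod := if old = 0 then st.1 else PySem.Int.floordiv st.1 old
          let zeros := if old = 0 then st.2.1 - 1 else st.2.1
          let prod2 := if nw = 0 then prod else prod * nw
          let zeros2 := if nw = 0 then zeros + 1 else zeros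
          (prod2, zeros2, st.2.2 ++ [if zeros2 ≠ 0 then 0 else prod2]))
        (pz.1, pz.2, [if pz.2 ≠ 0 then 0 else pz.1])
    st.2.2

-- ===== PRECONDITION & SPEC =====
def Spec_adjProducts (series : List Int) (adj : Int) (out : List Int) : Prop := out = adjProducts_alt series adj
instance (series : List Int) (adj : Int) (out : List Int) : Decidable (Spec_adjProducts series adj out) := by unfold Spec_adjProducts; infer_instance

-- ===== CLAIM (what is proved, stated in full; the proofs are below) =====
def Claim_equal_adjProducts : Prop := ∀ (series : List Int) (adj : Int), Dom_adjProducts series adj → Spec_adjProducts series adj (adjProducts series adj)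

-- ===== LEMMAS AND PROOFS =====

-- product of the nonzero elements of a window
def pvP (l : List Int) : Int := (l.filter (fun x => x != 0)).prod
-- the window starting at k, of length a
def pvW (series : List Int) (a k : Nat) : List Int := (series.drop k).take a
-- the value B reports for a window
def pvV (series : List Int) (a k : Nat) : Int :=
  if ((pvW series a k).count 0 : Int) ≠ 0 then 0 else pvP (pvW series a k)

lemma pvVal (l : List Int) : (if ((l.count 0 : Int)) ≠ 0 then (0:Int) else pvP l) = l.prod := by
  by_cases h : l.count 0 = 0
  · have h0 : (0:Int) ∉ l := List.count_eq_zero.mp h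
    have hf : l.filter (fun x => x != 0) = l := by
      apply List.filter_eq_self.mpr
      intro x hx
      simp only [bne_iff_ne, ne_eq]
      rintro rfl; exact h0 hx
    simp [h, pvP, hf]
  · have h0 : (0:Int) ∈ l := by
      by_contra hc; exact h (List.count_eq_zero.mpr hc)
    have hp : l.prod = 0 := List.prod_eq_zero h0
    simp [hp]
    intro hc
    exact absurd (by exact_mod_cast hc) h

lemma pvInit (l : List Int) (p z : Int) :
    l.foldl (fun (pz : Int × Int) x => if x = 0 then (pz.1, pz.2 + 1) else (pz.1 * x, pz.2)) (p, z)
      = (p * pvP l, z + (l.count 0 : Int)) := by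
  induction l generalizing p z with
  | nil => simp [pvP]
  | cons x t ih =>
    by_cases hx : x = 0
    · subst hx; simp [List.foldl_cons, ih, pvP]; ring
    · simp [List.foldl_cons, hx, ih, pvP, mul_assoc]

lemma pvInner (series : List Int) (a k : Nat) (h : k + a ≤ series.length) :
    (List.range a).foldl (fun p j => p * series.getD (k + j) 0) 1 = (pvW series a k).prod := by
  induction a with
  | zero => simp [pvW]
  | succ b ih =>
    rw [List.range_succ, List.foldl_append, ih (by omega)]
    simp only [List.foldl_cons, List.foldl_nil, pvW]
    rw [List.take_add_one]
    have hget : (series.drop k)[b]? = some series[k + b] := by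
      rw [List.getElem?_drop]; exact List.getElem?_eq_getElem (by omega)
    rw [hget, List.getD_eq_getElem _ _ (show k + b < series.length by omega)]
    simp only [Option.toList_some, List.prod_append, List.prod_cons, List.prod_nil, mul_one]
    rfl


-- A equals the map of window products
lemma pvA (series : List Int) (adj : Int) (ha : 0 < adj) (hm : 0 < (series.length : Int) - adj) :
    adjProducts series adj
      = (List.range ((series.length : Int) - adj).toNat).map
          (fun k => (pvW series adj.toNat k).prod) := by
  unfold adjProducts
  rw [PySem.List.foldl_append_singleton_eq_map]
  simp only [PySem.List.len_eq, List.nil_append]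
  rw [PySem.List.pyRange_one 0 ((series.length : Int) - adj), List.map_map]
  simp only [sub_zero]
  apply List.map_congr_left
  intro k hk
  simp only [List.mem_range] at hk
  simp only [Function.comp]
  rw [PySem.List.pyRange_one 0 adj, List.foldl_map]
  have hk' : k + adj.toNat ≤ series.length := by omega
  rw [show (adj - 0).toNat = adj.toNat by simp]
  refine Eq.trans (PySem.List.foldl_congr_mem _ _ _ _ ?_) (pvInner series adj.toNat k hk')
  intro p j hj
  congr 1
  have h2 : (0 + (k:Int) + (0 + (j:Int))) = ((k + j : Nat) : Int) := by push_cast; ring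
  rw [h2, PySem.List.pyGetD_natCast]

-- value of B's report: nonzero-product + zero-count determine the window product
lemma pvStep (series : List Int) (adj : Int) (ha : 0 < adj) (k : Nat)
    (hk : (k + 1) + adj.toNat ≤ series.length) :
    (pvP (pvW series adj.toNat (k+1)) = (if series[k + adj.toNat]'(by omega) = 0
        then (if series[k]'(by omega) = 0 then pvP (pvW series adj.toNat k)
              else PySem.Int.floordiv (pvP (pvW series adj.toNat k)) (series[k]'(by omega)))
        else (if series[k]'(by omega) = 0 then pvP (pvW series adj.toNat k)
              else PySem.Int.floordiv (pvP (pvW series adj.toNat k)) (series[k]'(by omega)))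
             * series[k + adj.toNat]'(by omega)))
    ∧ (((pvW series adj.toNat (k+1)).count 0 : Int) = (if series[k + adj.toNat]'(by omega) = 0
        then (if series[k]'(by omega) = 0 then ((pvW series adj.toNat k).count 0 : Int) - 1
              else ((pvW series adj.toNat k).count 0 : Int)) + 1
        else (if series[k]'(by omega) = 0 then ((pvW series adj.toNat k).count 0 : Int) - 1
              else ((pvW series adj.toNat k).count 0 : Int)))) := by
  obtain ⟨c, hc⟩ : ∃ c, adj.toNat = c + 1 := ⟨adj.toNat - 1, by omega⟩
  have hklen : k < series.length := by omega
  have hka : k + adj.toNat < series.length := by omega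
  have hw1 : pvW series adj.toNat k = series[k] :: (series.drop (k+1)).take c := by
    unfold pvW
    rw [List.drop_eq_getElem_cons hklen, hc, List.take_succ_cons]
  have hw2 : pvW series adj.toNat (k+1)
      = (series.drop (k+1)).take c ++ [series[k + adj.toNat]] := by
    unfold pvW
    conv_lhs => rw [hc]
    rw [List.take_add_one]
    have hg : (series.drop (k+1))[c]? = some series[k + adj.toNat] := by
      rw [List.getElem?_drop]
      have : k + 1 + c = k + adj.toNat := by omega
      rw [this]
      exact List.getElem?_eq_getElem (by omega)
    rw [hg]
    rfl
  constructor
  · rw [hw1, hw2]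
    by_cases h0 : series[k] = 0
    · by_cases h1 : series[k + adj.toNat] = 0 <;>
        simp [pvP, List.filter_append, h0, h1]
    · have hdiv : ∀ q : Int, PySem.Int.floordiv (series[k] * q) series[k] = q :=
        fun q => Int.mul_fdiv_cancel_left q h0
      by_cases h1 : series[k + adj.toNat] = 0 <;>
        simp [pvP, List.filter_append, h0, h1, hdiv]
  · rw [hw1, hw2]
    by_cases h0 : series[k] = 0 <;> by_cases h1 : series[k + adj.toNat] = 0 <;>
      simp [List.count_append, h0, h1]

-- the sliding-window loop invariant
lemma pvLoop (series : List Int) (adj : Int) (ha : 0 < adj) (k : Nat)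
    (hk : k + adj.toNat ≤ series.length) :
    ((List.range k).map (fun (t : Nat) => (1:Int) + t)).foldl
      (fun (st : Int × Int × List Int) i =>
          let old := PySem.List.pyGetD series (i - 1) 0
          let nw := PySem.List.pyGetD series (i + adj - 1) 0
          let prod := if old = 0 then st.1 else PySem.Int.floordiv st.1 old
          let zeros := if old = 0 then st.2.1 - 1 else st.2.1
          let prod2 := if nw = 0 then prod else prod * nw
          let zeros2 := if nw = 0 then zeros + 1 else zeros
          (prod2, zeros2, st.2.2 ++ [if zeros2 ≠ 0 then 0 else prod2]))
      (pvP (pvW series adj.toNat 0), ((pvW series adj.toNat 0).count 0 : Int),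
        [pvV series adj.toNat 0])
    = (pvP (pvW series adj.toNat k), ((pvW series adj.toNat k).count 0 : Int),
        (List.range (k+1)).map (pvV series adj.toNat)) := by
  induction k with
  | zero => simp [List.range_one, pvV]
  | succ k ih =>
    rw [List.range_succ, List.map_append, List.foldl_append, ih (by omega)]
    simp only [List.map_cons, List.map_nil, List.foldl_cons, List.foldl_nil]
    have hklen : k < series.length := by omega
    have hka : k + adj.toNat < series.length := by omega
    have hold : PySem.List.pyGetD series ((1 + (k:Int)) - 1) 0 = series[k] := by
      rw [show (1 + (k:Int)) - 1 = ((k : Nat) : Int) by ring,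
        PySem.List.pyGetD_natCast]
      exact List.getD_eq_getElem _ _ hklen
    have hnw : PySem.List.pyGetD series ((1 + (k:Int)) + adj - 1) 0
        = series[k + adj.toNat] := by
      rw [show (1 + (k:Int)) + adj - 1 = ((k + adj.toNat : Nat) : Int) by
          omega,
        PySem.List.pyGetD_natCast]
      exact List.getD_eq_getElem _ _ hka
    obtain ⟨hP, hZ⟩ := pvStep series adj ha k hk
    simp only [hold, hnw]
    rw [List.range_succ (n := k + 1), List.map_append]
    refine Prod.ext ?_ (Prod.ext ?_ ?_)
    · simp only []
      rw [hP]
    · simp only []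
      rw [hZ]
    · simp only [List.map_cons, List.map_nil]
      congr 1
      unfold pvV
      rw [hP, hZ]

lemma pvV_eq (series : List Int) (a k : Nat) : pvV series a k = (pvW series a k).prod := by
  unfold pvV
  exact pvVal _

theorem pv_main (series : List Int) (adj : Int) :
    adjProducts series adj = adjProducts_alt series adj := by
  by_cases hm : (series.length : Int) - adj ≤ 0
  · unfold adjProducts adjProducts_alt
    simp only [PySem.List.len_eq]
    rw [show PySem.List.pyRange 0 ((series.length : Int) - adj) 1 = [] from
      PySem.List.pyRange_one_eq_nil (by omega)]
    simp [hm]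
  · by_cases ha : adj ≤ 0
    · unfold adjProducts adjProducts_alt
      simp only [PySem.List.len_eq]
      rw [if_neg hm, if_pos ha]
      rw [PySem.List.foldl_append_singleton_eq_map]
      have hinner : ∀ i : Int,
          (PySem.List.pyRange 0 adj 1).foldl
            (fun product j => product * PySem.List.pyGetD series (i + j) 0) 1 = 1 := by
        intro i
        rw [show PySem.List.pyRange 0 adj 1 = [] from PySem.List.pyRange_one_eq_nil ha]
        rfl
      simp only [hinner, List.nil_append]
      rw [List.map_const']
      rw [PySem.List.length_pyRange_one]
      simp
    · rw [not_le] at hm ha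
      rw [pvA series adj ha (by omega)]
      unfold adjProducts_alt
      simp only [PySem.List.len_eq]
      rw [if_neg (by omega), if_neg (by omega)]
      rw [PySem.List.slice_to series (by omega)]
      rw [pvInit]
      have hw0 : series.take adj.toNat = pvW series adj.toNat 0 := by
        unfold pvW; rw [List.drop_zero]
      rw [hw0]
      simp only [one_mul, zero_add]
      rw [PySem.List.pyRange_one 1 ((series.length : Int) - adj)]
      have ha' : 1 ≤ adj.toNat := by omega
      have han : adj.toNat < series.length := by omega
      have hk : (series.length - adj.toNat - 1) + adj.toNat ≤ series.length := by omega
      have hrange : ((series.length : Int) - adj - 1).toNat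
          = series.length - adj.toNat - 1 := by omega
      rw [hrange]
      show List.map (fun k => (pvW series adj.toNat k).prod)
          (List.range ((series.length : Int) - adj).toNat)
        = (((List.range (series.length - adj.toNat - 1)).map (fun (t : Nat) => (1:Int) + t)).foldl
            (fun (st : Int × Int × List Int) i =>
              let old := PySem.List.pyGetD series (i - 1) 0
              let nw := PySem.List.pyGetD series (i + adj - 1) 0
              let prod := if old = 0 then st.1 else PySem.Int.floordiv st.1 old
              let zeros := if old = 0 then st.2.1 - 1 else st.2.1
              let prod2 := if nw = 0 then prod else prod * nw
              let zeros2 := if nw = 0 then zeros + 1 else zeros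
              (prod2, zeros2, st.2.2 ++ [if zeros2 ≠ 0 then 0 else prod2]))
            (pvP (pvW series adj.toNat 0), ((pvW series adj.toNat 0).count 0 : Int),
              [pvV series adj.toNat 0])).2.2
      rw [pvLoop series adj ha (series.length - adj.toNat - 1) hk]
      have hsz : series.length - adj.toNat - 1 + 1 = ((series.length : Int) - adj).toNat := by
        omega
      rw [hsz]
      apply List.map_congr_left
      intro k _
      rw [pvV_eq]

-- ===== VERDICT (by name: the statement is the Claim_ definition above) =====
theorem adjProducts_spec : Claim_equal_adjProducts := by
  intro series adj _
  unfold Spec_adjProducts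
  exact pv_main series adj
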